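-- pv_equiv track=rewrite | github.com/MichaelBabiy23/InstaBot | GramAddict/plugins/telegram.py | _calculate_followers_gained
-- ===== SOURCE A (Python) =====
-- def _calculate_followers_gained(aggregated_data):
--     dates_sorted = sorted(aggregated_data.keys())
--     previous_followers = None
--     for date in dates_sorted:
--         current_followers = aggregated_data[date]["followers"]
--         if previous_followers is not None:
--             followers_gained = current_followers - previous_followers
--             aggregated_data[date]["followers_gained"] = followers_gained
--         previous_followers = current_followers
--     return aggregated_data
-- ===== SOURCE B (Python) =====
-- def _calculate_followers_gained(aggregated_data):
--     for date in list(aggregated_data):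
--         prev = max((k for k in aggregated_data if k < date), default=None)
--         if prev is not None:
--             aggregated_data[date]["followers_gained"] = (
--                 aggregated_data[date]["followers"]
--                 - aggregated_data[prev]["followers"]
--             )
--     return aggregated_data
-- ===== Notes on version B (the rewrite author's own statement) =====
-- stated objective: alternative
-- what changed: Replaces A's sort-then-scan (sorted date list walked once with a previous_followers accumulator) by a sort-free predecessor search: for each date independently, its predecessor is computed as max(k for k in the dict if k < date) and the gain written directly; no sorted order and no accumulator exist in B.
-- crash fix: On a dict with exactly one date whose inner dict lacks the 'followers' key, A raises KeyError (it reads that value just to seed its accumulator) while B returns the dict unchanged (the only date has no smaller key, so B reads nothing). — e.g. on _calculate_followers_gained([("a", [])]): A raises KeyError, B returns [("a", [])]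
import Mathlib
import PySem

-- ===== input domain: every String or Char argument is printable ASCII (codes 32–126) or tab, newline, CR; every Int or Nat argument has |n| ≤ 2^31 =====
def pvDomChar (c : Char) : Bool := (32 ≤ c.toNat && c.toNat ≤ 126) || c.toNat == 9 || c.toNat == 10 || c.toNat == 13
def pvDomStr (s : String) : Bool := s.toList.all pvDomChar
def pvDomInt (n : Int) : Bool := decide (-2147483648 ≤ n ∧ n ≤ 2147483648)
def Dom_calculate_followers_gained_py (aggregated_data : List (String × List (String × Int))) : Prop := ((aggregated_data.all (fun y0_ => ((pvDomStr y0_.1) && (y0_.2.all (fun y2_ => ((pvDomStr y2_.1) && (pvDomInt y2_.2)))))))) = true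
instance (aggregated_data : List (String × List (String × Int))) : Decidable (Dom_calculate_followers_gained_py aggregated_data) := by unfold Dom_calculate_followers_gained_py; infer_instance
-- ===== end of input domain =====

-- B replaces A's sort-then-scan accumulator pass by a sort-free per-date predecessor search
-- (max of the keys below each date); equivalence is about the returned value (both Pythons
-- also mutate the argument dict the same way where both return).

-- Python str '<' is '<' on toList (code-point lexicographic); fixed to the LinearOrder
-- instances so the order lemmas of the prelude apply directly
def pvStrLt (a b : String) : Bool :=
  @decide (a.toList < b.toList) (@LinearOrder.toDecidableLT (List Char) inferInstance _ _)
def pvSortedKeys (keys : List String) : List String :=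
  @PySem.List.sorted String (List Char) _ (@LinearOrder.toDecidableLT (List Char) inferInstance) keys (fun x => x.toList) false
def pvMaxKey (l : List String) : Option String :=
  @PySem.List.max? String (List Char) _ (@LinearOrder.toDecidableLT (List Char) inferInstance) l (fun x => x.toList)

-- shared representation helpers: the assoc list as a dict of dicts, and back
def pvToDict (ad : List (String × List (String × Int))) : PySem.Dict String (PySem.Dict String Int) :=
  PySem.Dict.mk (ad.map (fun p => (p.1, PySem.Dict.mk p.2)))
def pvOfDict (d : PySem.Dict String (PySem.Dict String Int)) : List (String × List (String × Int)) :=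
  d.items.map (fun p => (p.1, p.2.items))

-- ===== PORT A =====
-- A's loop: state = (dict so far, previous_followers : Option Int)
def pvALoop (d : PySem.Dict String (PySem.Dict String Int)) (prev : Option Int) (dates : List String) : PySem.Dict String (PySem.Dict String Int) :=
  match dates with
  | [] => d
  | date :: rest =>
    let current := (d.getD date PySem.Dict.empty).getD "followers" 0  -- aggregated_data[date]["followers"] (Pre_ guarantees the key)
    match prev with
    | some p => pvALoop (d.modify date PySem.Dict.empty (fun inner => inner.insert "followers_gained" (current - p))) (some current) rest
    | none => pvALoop d (some current) rest

def calculate_followers_gained_py (aggregated_data : List (String × List (String × Int))) : List (String × List (String × Int)) :=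
  let d := pvToDict aggregated_data
  let dates_sorted := pvSortedKeys d.keys  -- sorted(aggregated_data.keys())
  pvOfDict (pvALoop d none dates_sorted)

-- ===== PORT B =====
-- max((k for k in aggregated_data if k < date), default=None)
def pvFindPrev (keys : List String) (date : String) : Option String :=
  pvMaxKey (keys.filter (fun k => pvStrLt k date))

-- one iteration of B's loop over the dates (keys = the key snapshot, unchanged by the loop)
def pvBStep (keys : List String) (d : PySem.Dict String (PySem.Dict String Int)) (date : String) : PySem.Dict String (PySem.Dict String Int) :=
  match pvFindPrev keys date with
  | none => d
  | some prev =>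
    d.modify date PySem.Dict.empty (fun inner =>
      inner.insert "followers_gained"
        ((d.getD date PySem.Dict.empty).getD "followers" 0 - (d.getD prev PySem.Dict.empty).getD "followers" 0))

def calculate_followers_gained_py_alt (aggregated_data : List (String × List (String × Int))) : List (String × List (String × Int)) :=
  let d := pvToDict aggregated_data
  pvOfDict (d.keys.foldl (pvBStep d.keys) d)

-- ===== PRECONDITION & SPEC =====
-- Pre_ excludes the inputs on which the Python A raises KeyError (some inner dict lacks the
-- "followers" key) and assoc lists with duplicate outer or inner keys, which cannot arise from
-- a Python dict argument (a dict literal collapses them) and whose first-vs-last-match reading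
-- in the assoc-list encoding is accidental.
def Pre_calculate_followers_gained_py (aggregated_data : List (String × List (String × Int))) : Prop :=
  (aggregated_data.map Prod.fst).Nodup ∧
  ∀ p ∈ aggregated_data, (p.2.map Prod.fst).Nodup ∧ "followers" ∈ p.2.map Prod.fst
instance (aggregated_data : List (String × List (String × Int))) : Decidable (Pre_calculate_followers_gained_py aggregated_data) := by unfold Pre_calculate_followers_gained_py; infer_instance

def pvWitness_calculate_followers_gained_py : (List (String × List (String × Int))) :=
  [("2024-01-01", [("followers", 100)]), ("2024-01-02", [("followers", 110)])]

-- A raises KeyError on a dict with exactly one date whose inner dict lacks "followers"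
-- (it reads that value to seed its accumulator); B returns the dict unchanged there
-- (the only date has no smaller key, so B reads nothing).
def Raises_calculate_followers_gained_py (aggregated_data : List (String × List (String × Int))) : Prop :=
  aggregated_data.length = 1 ∧ ∀ p ∈ aggregated_data, "followers" ∉ p.2.map Prod.fst
instance (aggregated_data : List (String × List (String × Int))) : Decidable (Raises_calculate_followers_gained_py aggregated_data) := by unfold Raises_calculate_followers_gained_py; infer_instance

def pvRaiseWitness_calculate_followers_gained_py : (List (String × List (String × Int))) := [("a", [])]
def pvRaiseWitnessOut_calculate_followers_gained_py : List (String × List (String × Int)) := [("a", [])]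

def Spec_calculate_followers_gained_py (aggregated_data : List (String × List (String × Int))) (out : List (String × List (String × Int))) : Prop := out = calculate_followers_gained_py_alt aggregated_data
instance (aggregated_data : List (String × List (String × Int))) (out : List (String × List (String × Int))) : Decidable (Spec_calculate_followers_gained_py aggregated_data out) := by unfold Spec_calculate_followers_gained_py; infer_instance

-- ===== CLAIM (what is proved, stated in full; the proofs are below) =====
def Claim_equal_calculate_followers_gained_py : Prop := ∀ (aggregated_data : List (String × List (String × Int))), Dom_calculate_followers_gained_py aggregated_data → Pre_calculate_followers_gained_py aggregated_data → Spec_calculate_followers_gained_py aggregated_data (calculate_followers_gained_py aggregated_data)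

def Claim_raises_calculate_followers_gained_py : Prop := (∀ (aggregated_data : List (String × List (String × Int))), Dom_calculate_followers_gained_py aggregated_data → Raises_calculate_followers_gained_py aggregated_data → ¬ Pre_calculate_followers_gained_py aggregated_data) ∧ (Dom_calculate_followers_gained_py (pvRaiseWitness_calculate_followers_gained_py) ∧ Raises_calculate_followers_gained_py (pvRaiseWitness_calculate_followers_gained_py) ∧ calculate_followers_gained_py_alt (pvRaiseWitness_calculate_followers_gained_py) = pvRaiseWitnessOut_calculate_followers_gained_py)

-- ===== LEMMAS AND PROOFS =====

-- "followers" as read by either program from date x's inner dict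
def pvFr (d : PySem.Dict String (PySem.Dict String Int)) (x : String) : Int :=
  (d.getD x PySem.Dict.empty).getD "followers" 0

-- proof-side pair form of A's accumulator step
def pvAPair (d : PySem.Dict String (PySem.Dict String Int)) (pc : String × String) : PySem.Dict String (PySem.Dict String Int) :=
  d.modify pc.2 PySem.Dict.empty (fun inner => inner.insert "followers_gained" (pvFr d pc.2 - pvFr d pc.1))

-- the predecessor A's pass effectively uses: the left neighbour in the sorted pair list
def pvPredA (L : List (String × String)) (x : String) : Option String :=
  (L.find? (fun pc => pc.2 == x)).map Prod.fst

-- the "followers" reading of any date is invariant under inserting "followers_gained" anywhere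
lemma pv_cf_modify (d : PySem.Dict String (PySem.Dict String Int)) (y x : String) (v : Int) :
    pvFr (d.modify y PySem.Dict.empty (fun inner => inner.insert "followers_gained" v)) x = pvFr d x := by
  unfold pvFr
  rw [PySem.Dict.getD_modify]
  by_cases h : x = y
  · subst h
    rw [if_pos rfl, PySem.Dict.getD_insert_of_ne]
    decide
  · rw [if_neg h]

lemma pv_fr_bstep (keys : List String) (d : PySem.Dict String (PySem.Dict String Int)) (date x : String) :
    pvFr (pvBStep keys d date) x = pvFr d x := by
  unfold pvBStep
  cases pvFindPrev keys date with
  | none => rfl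
  | some prev => exact pv_cf_modify ..

-- A's accumulator pass over p :: xs equals the fold of pvAPair over the consecutive pairs
lemma pv_loop_eq (xs : List String) : ∀ (d : PySem.Dict String (PySem.Dict String Int)) (p : String),
    pvALoop d (some (pvFr d p)) xs = ((p :: xs).zip xs).foldl pvAPair d := by
  induction xs with
  | nil => intro d p; rfl
  | cons x t ih =>
    intro d p
    calc pvALoop d (some (pvFr d p)) (x :: t)
        = pvALoop (pvAPair d (p, x)) (some (pvFr d x)) t := rfl
      _ = pvALoop (pvAPair d (p, x)) (some (pvFr (pvAPair d (p, x)) x)) t := by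
          rw [show pvAPair d (p, x)
              = d.modify x PySem.Dict.empty (fun inner => inner.insert "followers_gained" (pvFr d x - pvFr d p)) from rfl,
            pv_cf_modify]
      _ = ((x :: t).zip t).foldl pvAPair (pvAPair d (p, x)) := ih _ x
      _ = ((p :: x :: t).zip (x :: t)).foldl pvAPair d := by
          simp [List.zip_cons_cons]

lemma pv_top (d : PySem.Dict String (PySem.Dict String Int)) (ds : List String) :
    pvALoop d none ds = (ds.zip (ds.drop 1)).foldl pvAPair d := by
  cases ds with
  | nil => rfl
  | cons x xs => exact pv_loop_eq xs d x

-- no pair ends in x ⇒ no predecessor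
lemma pv_predA_none (L : List (String × String)) (x : String) (h : x ∉ L.map Prod.snd) :
    pvPredA L x = none := by
  unfold pvPredA
  rw [List.find?_eq_none.2]
  · rfl
  · intro pc hpc hx
    exact h (List.mem_map.2 ⟨pc, hpc, by simpa using hx⟩)

-- Bool↔Prop bridge for the key comparison
lemma pvStrLt_true (a b : String) : pvStrLt a b = true ↔ a.toList < b.toList := by
  unfold pvStrLt
  exact @decide_eq_true_iff _ (@LinearOrder.toDecidableLT (List Char) inferInstance _ _)

-- what A's fold leaves at each key, in terms of the ORIGINAL dict d0
lemma pv_foldA_getD (d0 : PySem.Dict String (PySem.Dict String Int)) :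
    ∀ (L : List (String × String)) (d : PySem.Dict String (PySem.Dict String Int)),
    (L.map Prod.snd).Nodup → (∀ k, pvFr d k = pvFr d0 k) → ∀ x,
    (L.foldl pvAPair d).getD x PySem.Dict.empty =
      match pvPredA L x with
      | some p => (d.getD x PySem.Dict.empty).insert "followers_gained" (pvFr d0 x - pvFr d0 p)
      | none => d.getD x PySem.Dict.empty := by
  intro L
  induction L with
  | nil => intro d _ _ x; simp [pvPredA]
  | cons pc rest ih =>
    intro d hnd hr x
    obtain ⟨p, c⟩ := pc
    have hnd' : (rest.map Prod.snd).Nodup := (List.nodup_cons.1 hnd).2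
    have hcn : c ∉ rest.map Prod.snd := (List.nodup_cons.1 hnd).1
    have hr' : ∀ k, pvFr (pvAPair d (p, c)) k = pvFr d0 k := by
      intro k
      rw [show pvAPair d (p, c)
          = d.modify c PySem.Dict.empty (fun inner => inner.insert "followers_gained" (pvFr d c - pvFr d p)) from rfl,
        pv_cf_modify]
      exact hr k
    have hstep : ((p, c) :: rest).foldl pvAPair d = rest.foldl pvAPair (pvAPair d (p, c)) := rfl
    rw [hstep, ih (pvAPair d (p, c)) hnd' hr' x]
    by_cases hx : x = c
    · subst hx
      rw [pv_predA_none rest x hcn]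
      have hpa : pvPredA ((p, x) :: rest) x = some p := by
        unfold pvPredA; simp [List.find?]
      rw [hpa]
      show (pvAPair d (p, x)).getD x PySem.Dict.empty = _
      unfold pvAPair
      rw [PySem.Dict.getD_modify_self, hr x, hr p]
    · have hpa : pvPredA ((p, c) :: rest) x = pvPredA rest x := by
        unfold pvPredA
        simp [List.find?, show (c == x) = false from by simpa using fun h => hx h.symm]
      rw [hpa]
      have hgd : (pvAPair d (p, c)).getD x PySem.Dict.empty = d.getD x PySem.Dict.empty := by
        unfold pvAPair
        exact PySem.Dict.getD_modify_of_ne _ _ _ hx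
      cases pvPredA rest x <;> simp [hgd]

-- what B's fold leaves at each key, in terms of the ORIGINAL dict d0
lemma pv_foldB_getD (keys : List String) (d0 : PySem.Dict String (PySem.Dict String Int)) :
    ∀ (K : List String) (d : PySem.Dict String (PySem.Dict String Int)),
    K.Nodup → (∀ k, pvFr d k = pvFr d0 k) → ∀ x,
    (K.foldl (pvBStep keys) d).getD x PySem.Dict.empty =
      match (if x ∈ K then pvFindPrev keys x else none) with
      | some p => (d.getD x PySem.Dict.empty).insert "followers_gained" (pvFr d0 x - pvFr d0 p)
      | none => d.getD x PySem.Dict.empty := by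
  intro K
  induction K with
  | nil => intro d _ _ x; simp
  | cons date rest ih =>
    intro d hnd hr x
    have hnd' := (List.nodup_cons.1 hnd).2
    have hdn : date ∉ rest := (List.nodup_cons.1 hnd).1
    have hr' : ∀ k, pvFr (pvBStep keys d date) k = pvFr d0 k := fun k => (pv_fr_bstep ..).trans (hr k)
    have hstep : (date :: rest).foldl (pvBStep keys) d = rest.foldl (pvBStep keys) (pvBStep keys d date) := rfl
    rw [hstep, ih (pvBStep keys d date) hnd' hr' x]
    by_cases hx : x = date
    · subst hx
      rw [if_neg hdn, if_pos (List.mem_cons_self ..)]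
      cases hfp : pvFindPrev keys x with
      | none =>
        have hd' : pvBStep keys d x = d := by unfold pvBStep; rw [hfp]
        rw [hd']
      | some prev =>
        have hd' : pvBStep keys d x
            = d.modify x PySem.Dict.empty (fun inner =>
                inner.insert "followers_gained" (pvFr d x - pvFr d prev)) := by
          unfold pvBStep; rw [hfp]; rfl
        rw [hd', PySem.Dict.getD_modify_self, hr x, hr prev]
    · have hgd : (pvBStep keys d date).getD x PySem.Dict.empty = d.getD x PySem.Dict.empty := by
        unfold pvBStep
        cases pvFindPrev keys date with
        | none => rfl
        | some prev => exact PySem.Dict.getD_modify_of_ne _ _ _ hx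
      have hmem : (x ∈ date :: rest) ↔ (x ∈ rest) := by
        simp [List.mem_cons, hx]
      by_cases hxr : x ∈ rest
      · rw [if_pos hxr, if_pos (hmem.2 hxr)]
        cases pvFindPrev keys x <;> simp [hgd]
      · rw [if_neg hxr, if_neg (fun h => hxr (hmem.1 h)), hgd]

-- both folds only touch keys already present, so the key list (hence its order) is unchanged
lemma pv_keys_modify_mem (d : PySem.Dict String (PySem.Dict String Int)) (k : String) (f : PySem.Dict String Int → PySem.Dict String Int)
    (h : k ∈ d.keys) : (d.modify k PySem.Dict.empty f).keys = d.keys := by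
  rw [PySem.Dict.keys_modify, PySem.Dict.keys_insert_of_contains]
  exact (PySem.Dict.contains_iff_mem_keys d k).2 h

lemma pv_keys_foldA : ∀ (L : List (String × String)) (d : PySem.Dict String (PySem.Dict String Int)),
    (∀ pc ∈ L, pc.2 ∈ d.keys) → (L.foldl pvAPair d).keys = d.keys := by
  intro L
  induction L with
  | nil => intro d _; rfl
  | cons pc rest ih =>
    intro d h
    have hk : (pvAPair d pc).keys = d.keys :=
      pv_keys_modify_mem d pc.2 _ (h pc (List.mem_cons_self ..))
    rw [List.foldl_cons, ih (pvAPair d pc) (fun q hq => hk ▸ h q (List.mem_cons_of_mem _ hq)), hk]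

lemma pv_keys_foldB (keys : List String) : ∀ (K : List String) (d : PySem.Dict String (PySem.Dict String Int)),
    (∀ k ∈ K, k ∈ d.keys) → (K.foldl (pvBStep keys) d).keys = d.keys := by
  intro K
  induction K with
  | nil => intro d _; rfl
  | cons date rest ih =>
    intro d h
    have hk : (pvBStep keys d date).keys = d.keys := by
      unfold pvBStep
      cases pvFindPrev keys date with
      | none => rfl
      | some prev => exact pv_keys_modify_mem d date _ (h date (List.mem_cons_self ..))
    rw [List.foldl_cons, ih (pvBStep keys d date) (fun q hq => hk ▸ h q (List.mem_cons_of_mem _ hq)), hk]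

-- on a strictly ascending list the last element is a maximum
lemma pv_last_isMax (l : List String) (hp : l.Pairwise (fun a b => a.toList < b.toList)) :
    ∀ m, l.getLast? = some m → ∀ y ∈ l, y.toList ≤ m.toList := by
  induction l with
  | nil => intro m h; cases h
  | cons a t ih =>
    intro m hm y hy
    cases t with
    | nil =>
      simp at hm hy
      subst hm; subst hy; exact le_refl _
    | cons b t' =>
      rw [List.getLast?_cons_cons] at hm
      have hmem : m ∈ b :: t' := by
        obtain ⟨l', hl'⟩ := List.getLast?_eq_some_iff.1 hm
        rw [hl']; simp
      rcases List.mem_cons.1 hy with h1 | h2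
      · subst h1
        exact le_of_lt ((List.pairwise_cons.1 hp).1 m hmem)
      · exact ih (List.pairwise_cons.1 hp).2 m hm y h2

-- max? of any rearrangement of a strictly ascending list is that list's last element
lemma pv_max_perm (l s : List String) (hperm : l.Perm s)
    (hp : s.Pairwise (fun a b => a.toList < b.toList)) :
    pvMaxKey l = s.getLast? := by
  unfold pvMaxKey
  cases hsl : s.getLast? with
  | none =>
    rw [List.getLast?_eq_none_iff] at hsl
    subst hsl
    rw [@PySem.List.max?_eq_none_iff String (List Char) _ (@LinearOrder.toDecidableLT (List Char) inferInstance)]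
    exact List.Perm.eq_nil hperm
  | some m =>
    cases hml : @PySem.List.max? String (List Char) _ (@LinearOrder.toDecidableLT (List Char) inferInstance) l (fun x => x.toList) with
    | none =>
      rw [@PySem.List.max?_eq_none_iff String (List Char) _ (@LinearOrder.toDecidableLT (List Char) inferInstance)] at hml
      subst hml
      have : s = [] := hperm.symm.eq_nil
      subst this
      cases hsl
    | some m' =>
      have hm'l : m' ∈ l := @PySem.List.max?_mem String (List Char) _ (@LinearOrder.toDecidableLT (List Char) inferInstance) _ _ _ hml
      have hm's : m' ∈ s := hperm.mem_iff.1 hm'l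
      have hms : m ∈ s := by
        obtain ⟨l', hl'⟩ := List.getLast?_eq_some_iff.1 hsl
        rw [hl']; simp
      have h1 : m.toList ≤ m'.toList := PySem.List.max?_isMax hml m (hperm.mem_iff.2 hms)
      have h2 : m'.toList ≤ m.toList := pv_last_isMax s hp m hsl m' hm's
      rw [String.toList_inj.mp (le_antisymm h2 h1)]

-- in a strictly ascending list, the left zip-neighbour of x is the last element below x
lemma pv_zip_pred (x : String) : ∀ (s : List String), s.Pairwise (fun a b => a.toList < b.toList) → x ∈ s →
    pvPredA (s.zip (s.drop 1)) x = (s.filter (fun k => pvStrLt k x)).getLast? := by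
  intro s
  induction s with
  | nil => intro _ h; cases h
  | cons a rest ih =>
    intro hp hx
    have ha : ∀ y ∈ rest, a.toList < y.toList := (List.pairwise_cons.1 hp).1
    have hp' := (List.pairwise_cons.1 hp).2
    rcases List.mem_cons.1 hx with rfl | hxr
    · -- x is the minimum: no pair ends in x and nothing is below x
      have h1 : pvPredA ((x :: rest).zip ((x :: rest).drop 1)) x = none := by
        apply pv_predA_none
        intro hmem
        obtain ⟨pc, hpc, hpc2⟩ := List.mem_map.1 hmem
        have hsub : pc.2 ∈ rest := by
          have := (List.of_mem_zip hpc).2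
          simpa using this
        rw [hpc2] at hsub
        exact absurd (ha x hsub) (lt_irrefl _)
      have h2 : (x :: rest).filter (fun k => pvStrLt k x) = [] := by
        rw [List.filter_eq_nil_iff]
        intro y hy
        rcases List.mem_cons.1 hy with rfl | hyr
        · simp only [pvStrLt_true]; exact lt_irrefl _
        · simp only [pvStrLt_true]; exact not_lt_of_gt (ha y hyr)
      rw [h1, h2]; rfl
    · -- x is in the tail: rest = b :: t and a < x
      have hax : a.toList < x.toList := ha x hxr
      cases rest with
      | nil => cases hxr
      | cons b t =>
        have hzip : (a :: b :: t).zip ((a :: b :: t).drop 1) = (a, b) :: ((b :: t).zip ((b :: t).drop 1)) := by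
          simp [List.zip_cons_cons]
        have hfa : (a :: b :: t).filter (fun k => pvStrLt k x)
            = a :: ((b :: t).filter (fun k => pvStrLt k x)) := by
          rw [List.filter_cons_of_pos (p := fun k => pvStrLt k x) (l := b :: t) ((pvStrLt_true a x).2 hax)]
        rw [hzip, hfa]
        by_cases hxb : x = b
        · subst hxb
          have h1 : pvPredA ((a, x) :: ((x :: t).zip ((x :: t).drop 1))) x = some a := by
            unfold pvPredA; simp [List.find?]
          have h2 : (x :: t).filter (fun k => pvStrLt k x) = [] := by
            rw [List.filter_eq_nil_iff]
            intro y hy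
            rcases List.mem_cons.1 hy with rfl | hyt
            · simp only [pvStrLt_true]; exact lt_irrefl _
            · simp only [pvStrLt_true]; exact not_lt_of_gt ((List.pairwise_cons.1 hp').1 y hyt)
          rw [h1, h2]; rfl
        · have hxt : x ∈ t := by
            rcases List.mem_cons.1 hxr with rfl | h
            · exact absurd rfl hxb
            · exact h
          have hbxlt : b.toList < x.toList :=
            (List.pairwise_cons.1 hp').1 x hxt
          have h1 : pvPredA ((a, b) :: ((b :: t).zip ((b :: t).drop 1))) x
              = pvPredA ((b :: t).zip ((b :: t).drop 1)) x := by
            unfold pvPredA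
            simp [List.find?, show (b == x) = false from by simpa using fun h => hxb h.symm]
          have hfb : (b :: t).filter (fun k => pvStrLt k x)
              = b :: (t.filter (fun k => pvStrLt k x)) := by
            rw [List.filter_cons_of_pos (p := fun k => pvStrLt k x) (l := t) ((pvStrLt_true b x).2 hbxlt)]
          rw [h1, ih hp' hxr, hfb, List.getLast?_cons_cons]

-- B's max-below predecessor = A's sorted left neighbour, at every key
lemma pv_pred_eq (keys : List String) (hnd : keys.Nodup) (x : String) (hx : x ∈ keys) :
    pvFindPrev keys x
      = pvPredA ((pvSortedKeys keys).zip
          ((pvSortedKeys keys).drop 1)) x := by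
  have hperm : (pvSortedKeys keys).Perm keys :=
    @PySem.List.sorted_perm String (List Char) _ (@LinearOrder.toDecidableLT (List Char) inferInstance) keys (fun y => y.toList) false
  have hsnd : (pvSortedKeys keys).Nodup := hperm.nodup_iff.2 hnd
  have hple : (pvSortedKeys keys).Pairwise (fun a b => a.toList ≤ b.toList) := by
    unfold pvSortedKeys
    exact PySem.List.sorted_pairwise keys (fun y => y.toList)
  have hplt : (pvSortedKeys keys).Pairwise (fun a b => a.toList < b.toList) :=
    (hple.and (List.nodup_iff_pairwise_ne.mp hsnd)).imp
      (fun h => lt_of_le_of_ne h.1 (fun he => h.2 (String.toList_inj.mp he)))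
  rw [pv_zip_pred x _ hplt (hperm.mem_iff.2 hx)]
  unfold pvFindPrev
  exact pv_max_perm _ _ ((hperm.filter _).symm) (hplt.filter _)

-- ===== VERDICT (by name: the statement is the Claim_ definition above) =====
theorem calculate_followers_gained_py_spec : Claim_equal_calculate_followers_gained_py := by
  intro ad _ hpre
  unfold Spec_calculate_followers_gained_py calculate_followers_gained_py calculate_followers_gained_py_alt
  apply congrArg pvOfDict
  have hkeys : (pvToDict ad).keys = ad.map Prod.fst := by
    simp [pvToDict, PySem.Dict.keys]
  have hnd : (pvToDict ad).keys.Nodup := hkeys ▸ hpre.1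
  have hperm : (pvSortedKeys (pvToDict ad).keys).Perm (pvToDict ad).keys :=
    @PySem.List.sorted_perm String (List Char) _ (@LinearOrder.toDecidableLT (List Char) inferInstance) (pvToDict ad).keys (fun y => y.toList) false
  have hsnd : (pvSortedKeys (pvToDict ad).keys).Nodup := hperm.nodup_iff.2 hnd
  rw [pv_top]
  have hsndA : (((pvSortedKeys (pvToDict ad).keys).zip
      ((pvSortedKeys (pvToDict ad).keys).drop 1)).map Prod.snd).Nodup := by
    rw [List.map_snd_zip (by simp)]
    exact (List.drop_sublist 1 _).nodup hsnd
  have hmemA : ∀ pc ∈ ((pvSortedKeys (pvToDict ad).keys).zip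
      ((pvSortedKeys (pvToDict ad).keys).drop 1)), pc.2 ∈ (pvToDict ad).keys := by
    intro pc hpc
    exact hperm.mem_iff.1 (List.mem_of_mem_drop (List.of_mem_zip hpc).2)
  have hKA := pv_keys_foldA _ (pvToDict ad) hmemA
  have hKB := pv_keys_foldB (pvToDict ad).keys (pvToDict ad).keys (pvToDict ad) (fun k hk => hk)
  apply PySem.Dict.ext
  rw [PySem.Dict.items_eq_map_keys _ (by rw [hKA]; exact hnd) PySem.Dict.empty,
    PySem.Dict.items_eq_map_keys _ (by rw [hKB]; exact hnd) PySem.Dict.empty, hKA, hKB]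
  apply List.map_congr_left
  intro k hk
  rw [pv_foldA_getD (pvToDict ad) _ (pvToDict ad) hsndA (fun _ => rfl) k,
    pv_foldB_getD (pvToDict ad).keys (pvToDict ad) _ (pvToDict ad) hnd (fun _ => rfl) k,
    if_pos hk, pv_pred_eq (pvToDict ad).keys hnd k hk]

theorem calculate_followers_gained_py_raises : Claim_raises_calculate_followers_gained_py := by
  unfold Claim_raises_calculate_followers_gained_py
  constructor
  · rintro ad _ ⟨hlen, hmiss⟩ ⟨_, hall⟩
    match ad, hlen with
    | [p], _ => exact hmiss p (by simp) (hall p (by simp)).2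
  · decide

-- self-check: the raise witness really lies outside Pre_ (via the raises theorem)
theorem pv_raise_witness_ok : ¬ Pre_calculate_followers_gained_py pvRaiseWitness_calculate_followers_gained_py :=
  calculate_followers_gained_py_raises.1 pvRaiseWitness_calculate_followers_gained_py (by decide) (by decide)
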